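-- pv_equiv track=rewrite | github.com/hrandonbong/Array15 | row_puzzle.py | row_puzzle
-- ===== SOURCE A (Python) =====
-- def row_puzzle(list,memo=None,index=0):
--     """This program takes a list of integers as its parameters. It returns a true or false
--     statement. If the list of numbers can be solved for the row puzzle return value is true. If no it
--     is false."""
--     #If the row is a winner, this if statement is passed.
--     if index == len(list)-1 and list[index]==0:
--         return True
--
--     #if the index is out of range, False
--     if index < 0 or  index >= len(list):
--         return False
--
--     #If not none, means true
--     if not memo:
--         memo = {}
--
--     pos = list[index]
--
--     #Checks if the index has already been visited
--     if index not in memo: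
--         memo[index] = list[index:]
--         #In a true or false return, the true statement is returned
--         return row_puzzle(list,memo,index-pos) or row_puzzle(list,memo,index+pos)
--     return False
-- ===== SOURCE B (Python) =====
-- def row_puzzle(list, memo=None, index=0):
--     """Iterative DFS over indices with an explicit stack and a visited set of
--     indices (no recursion, no stored list slices).  Does not mutate the caller's
--     memo argument (A adds entries to it); return value is identical."""
--     n = len(list)
--     visited = set(memo) if memo else set()
--     stack = [index]
--     while stack:
--         i = stack.pop()
--         if i == n - 1 and list[i] == 0:
--             return True
--         if i < 0 or i >= n or i in visited:
--             continue
--         visited.add(i)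
--         step = list[i]
--         stack.append(i + step)
--         stack.append(i - step)
--     return False
-- ===== Notes on version B (the rewrite author's own statement) =====
-- stated objective: alternative
-- what changed: Recursive memoized search that stores a list slice per visited index in a shared memo dict is replaced by an iterative explicit-stack DFS over a visited set of plain indices; B also does not mutate the caller's memo dict.
import Mathlib
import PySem

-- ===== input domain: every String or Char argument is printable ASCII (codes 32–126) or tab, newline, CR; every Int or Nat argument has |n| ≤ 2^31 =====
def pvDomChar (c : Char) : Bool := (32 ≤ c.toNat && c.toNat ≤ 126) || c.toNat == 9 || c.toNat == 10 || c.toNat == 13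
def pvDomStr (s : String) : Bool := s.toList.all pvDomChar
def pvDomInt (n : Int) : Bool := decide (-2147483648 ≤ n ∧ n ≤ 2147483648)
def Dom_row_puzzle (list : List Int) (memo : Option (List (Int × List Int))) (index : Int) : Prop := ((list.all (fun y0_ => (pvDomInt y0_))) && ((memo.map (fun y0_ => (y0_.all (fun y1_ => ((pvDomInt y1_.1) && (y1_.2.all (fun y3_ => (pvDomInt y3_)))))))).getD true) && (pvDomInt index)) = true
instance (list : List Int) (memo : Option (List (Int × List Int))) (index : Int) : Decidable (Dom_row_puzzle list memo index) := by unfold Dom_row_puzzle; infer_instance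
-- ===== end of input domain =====

-- B replaces A's recursive search (which stores an O(n) list slice per visited index in a
-- memo dict) by an iterative explicit-stack DFS over a visited set of plain indices.
-- Equivalence is about the RETURN value only: A mutates a caller-passed memo dict in place,
-- B does not touch it.

-- ===== PORT A =====
-- A's recursion threads the shared, in-place-mutated memo dict through the two recursive
-- calls (the left call's insertions are visible to the right call), so the helper returns
-- the memo alongside the Bool.  The fuel only makes the same computation total; fuel
-- list.length + 1 always suffices (rpGoA_isSome below), so `none` never reaches the
-- top-level call.
def rpGoA (list : List Int) : Nat → List (Int × List Int) → Int → Option (Bool × List (Int × List Int))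
  | 0, _, _ => none
  | fuel + 1, memo0, index =>
    -- if index == len(list)-1 and list[index]==0: return True
    if index = (list.length : Int) - 1 ∧ PySem.List.pyGet? list index = some 0 then
      some (true, memo0)
    -- if index < 0 or index >= len(list): return False
    else if index < 0 ∨ (list.length : Int) ≤ index then
      some (false, memo0)
    else
      -- if not memo: memo = {}
      let memo := if memo0.isEmpty then ([] : List (Int × List Int)) else memo0
      -- pos = list[index]   (index is in range here, so getD never supplies the default)
      let pos := (PySem.List.pyGet? list index).getD 0
      -- if index not in memo: …  else: return False
      if memo.any (fun kv => kv.1 == index) then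
        some (false, memo)
      else
        -- memo[index] = list[index:]   (fresh key: Python dict insertion appends)
        let memo1 := memo ++ [(index, PySem.List.slice list (some index) none)]
        -- return row_puzzle(list, memo, index-pos) or row_puzzle(list, memo, index+pos)
        match rpGoA list fuel memo1 (index - pos) with
        | none => none
        | some (b1, memo2) =>
          if b1 then some (true, memo2)
          else rpGoA list fuel memo2 (index + pos)

def row_puzzle (list : List Int) (memo : Option (List (Int × List Int))) (index : Int) : Bool :=
  match rpGoA list (list.length + 1) (memo.getD []) index with
  | some (b, _) => b
  | none => false

-- ===== PORT B =====
-- number of in-range indices not yet visited (termination measure of the DFS loop)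
def rpFresh (list : List Int) (visited : PySem.Set Int) : Nat :=
  (((List.range list.length).map (fun k : Nat => (k : Int))).filter (fun k => !(visited.contains k))).length

-- termination helpers for rpRunB (cited by name in its decreasing_by)
theorem rpFilter_le {α : Type} (p q : α → Bool) (h : ∀ a, q a = true → p a = true) :
    ∀ l : List α, (l.filter q).length ≤ (l.filter p).length := by
  intro l
  induction l with
  | nil => simp
  | cons a l ih =>
    simp only [List.filter_cons]
    cases hq : q a
    · cases hp : p a <;> simp <;> omega
    · rw [h a hq]; simp; omega

theorem rpFilter_lt {α : Type} (p q : α → Bool) (h : ∀ a, q a = true → p a = true)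
    (l : List α) (m : α) (hm : m ∈ l) (hp : p m = true) (hq : q m = false) :
    (l.filter q).length < (l.filter p).length := by
  induction l with
  | nil => cases hm
  | cons a l ih =>
    simp only [List.filter_cons]
    rcases List.mem_cons.mp hm with rfl | hm'
    · rw [hp, hq]
      simp only [List.length_cons]
      exact Nat.lt_succ_of_le (rpFilter_le p q h l)
    · have hrec := ih hm'
      cases hq2 : q a
      · cases hp2 : p a <;> simp <;> omega
      · rw [h a hq2]; simp; omega

theorem rpSetContains_iff (s : PySem.Set Int) (x : Int) : s.contains x = true ↔ x ∈ s := by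
  simp [PySem.Set.contains, List.contains_eq_mem]

theorem rpFresh_add_lt (list : List Int) (visited : PySem.Set Int) (i : Int)
    (h0 : 0 ≤ i) (h1 : i < (list.length : Int)) (h2 : ¬ visited.contains i = true) :
    rpFresh list (visited.add i) < rpFresh list visited := by
  unfold rpFresh
  have himp : ∀ a : Int, (!(visited.add i).contains a) = true → (!(visited.contains a)) = true := by
    intro a ha
    by_contra hc
    simp only [Bool.not_eq_true', Bool.not_eq_false] at ha hc
    have hmem : a ∈ visited.add i :=
      (PySem.Set.mem_add visited i a).mpr (Or.inl ((rpSetContains_iff visited a).mp hc))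
    rw [(rpSetContains_iff _ a).mpr hmem] at ha
    cases ha
  have hmem : i ∈ (List.range list.length).map (fun k : Nat => (k : Int)) :=
    List.mem_map.mpr ⟨i.toNat, List.mem_range.mpr (by omega), Int.toNat_of_nonneg h0⟩
  have hp : (!(visited.contains i)) = true := by simpa using h2
  have hq : (!(visited.add i).contains i) = false := by
    have : i ∈ visited.add i := (PySem.Set.mem_add visited i i).mpr (Or.inr rfl)
    simpa using (rpSetContains_iff (visited.add i) i).mpr this
  exact rpFilter_lt _ _ himp _ i hmem hp hq

def rpRunB (list : List Int) (stack : List Int) (visited : PySem.Set Int) : Bool :=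
  match stack with
  | [] => false
  | i :: rest =>
    if i = (list.length : Int) - 1 ∧ PySem.List.pyGet? list i = some 0 then true
    else if i < 0 ∨ (list.length : Int) ≤ i ∨ visited.contains i then
      rpRunB list rest visited
    else
      let step := (PySem.List.pyGet? list i).getD 0
      rpRunB list ((i - step) :: (i + step) :: rest) (visited.add i)
termination_by stack.length + 2 * rpFresh list visited
decreasing_by
  · simp only [List.length_cons]; omega
  · rename_i h
    push_neg at h
    have := rpFresh_add_lt list visited i (by omega) (by omega) (by simpa using h.2.2)
    simp only [List.length_cons]
    omega

def row_puzzle_alt (list : List Int) (memo : Option (List (Int × List Int))) (index : Int) : Bool :=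
  -- visited = set(memo) if memo else set()
  let visited : PySem.Set Int :=
    match memo with
    | none => PySem.Set.empty
    | some d => if d.isEmpty then PySem.Set.empty else PySem.Set.ofList (d.map Prod.fst)
  rpRunB list [index] visited

-- ===== PRECONDITION & SPEC =====
-- Pre_ excludes only the inputs on which the Python A raises IndexError: an empty list with
-- index == -1 (the win test evaluates list[-1] on the empty list); B raises there as well.
def Pre_row_puzzle (list : List Int) (memo : Option (List (Int × List Int))) (index : Int) : Prop :=
  ¬ (list = [] ∧ index = -1)
instance (list : List Int) (memo : Option (List (Int × List Int))) (index : Int) : Decidable (Pre_row_puzzle list memo index) := by unfold Pre_row_puzzle; infer_instance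

def pvWitness_row_puzzle : List Int × (Option (List (Int × List Int))) × Int := ([1, 2, 0], none, 0)

def Spec_row_puzzle (list : List Int) (memo : Option (List (Int × List Int))) (index : Int) (out : Bool) : Prop := out = row_puzzle_alt list memo index
instance (list : List Int) (memo : Option (List (Int × List Int))) (index : Int) (out : Bool) : Decidable (Spec_row_puzzle list memo index out) := by unfold Spec_row_puzzle; infer_instance

-- ===== CLAIM (what is proved, stated in full; the proofs are below) =====
def Claim_equal_row_puzzle : Prop := ∀ (list : List Int) (memo : Option (List (Int × List Int))) (index : Int), Dom_row_puzzle list memo index → Pre_row_puzzle list memo index → Spec_row_puzzle list memo index (row_puzzle list memo index)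

-- ===== LEMMAS AND PROOFS =====

theorem rpBoolFalse {b : Bool} (h : ¬ b = true) : b = false := by
  cases b
  · rfl
  · exact absurd rfl h

-- unfolding lemma for rpGoA at successor fuel ('if not memo: memo = {}' is the identity
-- on an association-list memo, so the isEmpty test disappears)
theorem rpGoA_succ (list : List Int) (fuel : Nat) (memo : List (Int × List Int)) (index : Int) :
    rpGoA list (fuel + 1) memo index =
      (if index = (list.length : Int) - 1 ∧ PySem.List.pyGet? list index = some 0 then
        some (true, memo)
      else if index < 0 ∨ (list.length : Int) ≤ index then
        some (false, memo)
      else if memo.any (fun kv => kv.1 == index) then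
        some (false, memo)
      else
        match rpGoA list fuel (memo ++ [(index, PySem.List.slice list (some index) none)])
            (index - (PySem.List.pyGet? list index).getD 0) with
        | none => none
        | some (b1, memo2) =>
          if b1 then some (true, memo2)
          else rpGoA list fuel memo2 (index + (PySem.List.pyGet? list index).getD 0)) := by
  cases memo with
  | nil => rfl
  | cons a l => rfl

theorem rpAny_append_mono (memo : List (Int × List Int)) (e : Int × List Int) (x : Int)
    (h : memo.any (fun kv => kv.1 == x) = true) :
    (memo ++ [e]).any (fun kv => kv.1 == x) = true := by
  simp only [List.any_append, Bool.or_eq_true]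
  exact Or.inl h

-- membership in the visited set built from the memo's keys = Python's 'index in memo'
theorem rpContains_keys (memo : List (Int × List Int)) (x : Int) :
    (PySem.Set.ofList (memo.map Prod.fst)).contains x = memo.any (fun kv => kv.1 == x) := by
  rw [Bool.eq_iff_iff, rpSetContains_iff, PySem.Set.mem_ofList]
  simp [List.any_eq_true, List.mem_map]

theorem rpOfList_append (l : List Int) (x : Int) :
    PySem.Set.ofList (l ++ [x]) = (PySem.Set.ofList l).add x := by
  simp [PySem.Set.ofList_eq_foldl, List.foldl_append]

-- the number of in-range keys missing from the memo (fuel bound for A's recursion)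
def rpFreshA (list : List Int) (memo : List (Int × List Int)) : Nat :=
  (((List.range list.length).map (fun k : Nat => (k : Int))).filter
    (fun k => !(memo.any (fun kv => kv.1 == k)))).length

-- keys of the memo only grow along A's recursion
theorem rpGoA_keys_mono (list : List Int) :
    ∀ fuel memo index b memo', rpGoA list fuel memo index = some (b, memo') →
      ∀ x, memo.any (fun kv => kv.1 == x) = true → memo'.any (fun kv => kv.1 == x) = true := by
  intro fuel
  induction fuel with
  | zero => intro memo index b memo' h; simp [rpGoA] at h
  | succ fuel ih =>
    intro memo index b memo' h x hx
    rw [rpGoA_succ] at h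
    split_ifs at h with h1 h2 h3
    · obtain ⟨rfl, rfl⟩ : b = true ∧ memo' = memo := by simpa using h.symm
      exact hx
    · obtain ⟨rfl, rfl⟩ : b = false ∧ memo' = memo := by simpa using h.symm
      exact hx
    · obtain ⟨rfl, rfl⟩ : b = false ∧ memo' = memo := by simpa using h.symm
      exact hx
    · cases h4 : rpGoA list fuel (memo ++ [(index, PySem.List.slice list (some index) none)])
          (index - (PySem.List.pyGet? list index).getD 0) with
      | none => rw [h4] at h; cases h
      | some r =>
        obtain ⟨b1, memo2⟩ := r
        rw [h4] at h
        have hx1 := ih _ _ _ _ h4 x (rpAny_append_mono memo _ x hx)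
        cases b1 with
        | true =>
          obtain ⟨rfl, rfl⟩ : b = true ∧ memo' = memo2 := by simpa using h.symm
          exact hx1
        | false =>
          simp only [Bool.false_eq_true, if_false] at h
          exact ih _ _ _ _ h x hx1

theorem rpFreshA_le (list : List Int) (memo memo' : List (Int × List Int))
    (h : ∀ x, memo.any (fun kv => kv.1 == x) = true → memo'.any (fun kv => kv.1 == x) = true) :
    rpFreshA list memo' ≤ rpFreshA list memo := by
  apply rpFilter_le
  intro a ha
  simp only [Bool.not_eq_true'] at ha ⊢
  cases hm : memo.any (fun kv => kv.1 == a)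
  · rfl
  · rw [h _ hm] at ha; cases ha

theorem rpFreshA_insert_lt (list : List Int) (memo : List (Int × List Int)) (index : Int)
    (e : List Int) (h0 : 0 ≤ index) (h1 : index < (list.length : Int))
    (h2 : memo.any (fun kv => kv.1 == index) = false) :
    rpFreshA list (memo ++ [(index, e)]) < rpFreshA list memo := by
  unfold rpFreshA
  have himp : ∀ a : Int, (!((memo ++ [(index, e)]).any (fun kv => kv.1 == a))) = true →
      (!(memo.any (fun kv => kv.1 == a))) = true := by
    intro a ha
    simp only [Bool.not_eq_true'] at ha ⊢
    cases hm : memo.any (fun kv => kv.1 == a)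
    · rfl
    · rw [rpAny_append_mono _ _ _ hm] at ha; cases ha
  have hmem : index ∈ (List.range list.length).map (fun k : Nat => (k : Int)) :=
    List.mem_map.mpr ⟨index.toNat, List.mem_range.mpr (by omega), Int.toNat_of_nonneg h0⟩
  have hp : (!(memo.any (fun kv => kv.1 == index))) = true := by simp [h2]
  have hq : (!((memo ++ [(index, e)]).any (fun kv => kv.1 == index))) = false := by
    simp [List.any_append]
  exact rpFilter_lt _ _ himp _ index hmem hp hq

-- fuel list.length + 1 always suffices for A's recursion
theorem rpGoA_isSome (list : List Int) :
    ∀ fuel memo index, rpFreshA list memo < fuel → (rpGoA list fuel memo index).isSome = true := by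
  intro fuel
  induction fuel with
  | zero => intro memo index h; omega
  | succ fuel ih =>
    intro memo index h
    rw [rpGoA_succ]
    split_ifs with h1 h2 h3
    · rfl
    · rfl
    · rfl
    · push_neg at h2
      have hfresh : rpFreshA list (memo ++ [(index, PySem.List.slice list (some index) none)]) <
          rpFreshA list memo :=
        rpFreshA_insert_lt list memo index _ h2.1 h2.2 (rpBoolFalse h3)
      have hl := ih (memo ++ [(index, PySem.List.slice list (some index) none)])
        (index - (PySem.List.pyGet? list index).getD 0) (by omega)
      cases h4 : rpGoA list fuel (memo ++ [(index, PySem.List.slice list (some index) none)])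
          (index - (PySem.List.pyGet? list index).getD 0) with
      | none => rw [h4] at hl; cases hl
      | some r =>
        obtain ⟨b1, memo2⟩ := r
        cases b1 with
        | true => simp
        | false =>
          simp only [Bool.false_eq_true, if_false]
          have hmono := rpGoA_keys_mono list fuel _ _ _ _ h4
          have hle : rpFreshA list memo2 ≤
              rpFreshA list (memo ++ [(index, PySem.List.slice list (some index) none)]) :=
            rpFreshA_le list _ _ hmono
          exact ih memo2 (index + (PySem.List.pyGet? list index).getD 0) (by omega)

-- bisimulation: A's recursion, with the pending right branches of the 'or' as B's stack
theorem rpBisim (list : List Int) :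
    ∀ fuel memo index b memo', rpGoA list fuel memo index = some (b, memo') →
      ∀ s, rpRunB list (index :: s) (PySem.Set.ofList (memo.map Prod.fst)) =
        (if b then true else rpRunB list s (PySem.Set.ofList (memo'.map Prod.fst))) := by
  intro fuel
  induction fuel with
  | zero => intro memo index b memo' h; simp [rpGoA] at h
  | succ fuel ih =>
    intro memo index b memo' h s
    rw [rpGoA_succ] at h
    rw [rpRunB]
    split_ifs at h with h1 h2 h3
    · obtain ⟨rfl, rfl⟩ : b = true ∧ memo' = memo := by simpa using h.symm
      rw [if_pos h1]
      simp
    · obtain ⟨rfl, rfl⟩ : b = false ∧ memo' = memo := by simpa using h.symm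
      rw [if_neg h1, if_pos (by tauto)]
      simp
    · obtain ⟨rfl, rfl⟩ : b = false ∧ memo' = memo := by simpa using h.symm
      rw [if_neg h1, if_pos (by rw [rpContains_keys]; tauto)]
      simp
    · push_neg at h2
      have hcont : (PySem.Set.ofList (memo.map Prod.fst)).contains index = false := by
        rw [rpContains_keys]; exact rpBoolFalse h3
      rw [if_neg h1, if_neg (by push_neg; exact ⟨by omega, by omega, by rw [hcont]; simp⟩)]
      cases h4 : rpGoA list fuel (memo ++ [(index, PySem.List.slice list (some index) none)])
          (index - (PySem.List.pyGet? list index).getD 0) with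
      | none => rw [h4] at h; cases h
      | some r =>
        obtain ⟨b1, memo2⟩ := r
        rw [h4] at h
        have hset : PySem.Set.ofList (((memo ++ [(index, PySem.List.slice list (some index) none)])).map Prod.fst)
            = (PySem.Set.ofList (memo.map Prod.fst)).add index := by
          rw [List.map_append]; exact rpOfList_append _ index
        have hleft := ih _ _ _ _ h4 ((index + (PySem.List.pyGet? list index).getD 0) :: s)
        rw [hset] at hleft
        rw [hleft]
        cases b1 with
        | true =>
          obtain ⟨rfl, rfl⟩ : b = true ∧ memo' = memo2 := by simpa using h.symm
          simp
        | false =>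
          simp only [Bool.false_eq_true, if_false] at h ⊢
          exact ih _ _ _ _ h s

-- the initial visited set of B is the key set of A's initial memo
theorem rpInit (memo : Option (List (Int × List Int))) :
    (match memo with
      | none => PySem.Set.empty
      | some d => if d.isEmpty then PySem.Set.empty else PySem.Set.ofList (d.map Prod.fst))
    = PySem.Set.ofList ((memo.getD []).map Prod.fst) := by
  cases memo with
  | none => rfl
  | some d => cases d <;> rfl

-- ===== VERDICT (by name: the statement is the Claim_ definition above) =====
theorem row_puzzle_spec : Claim_equal_row_puzzle := by
  intro list memo index _hdom _hpre
  unfold Spec_row_puzzle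
  have hbound : rpFreshA list (memo.getD []) < list.length + 1 := by
    unfold rpFreshA
    have h1 := List.length_filter_le
      (fun k => !((memo.getD []).any (fun kv => kv.1 == k)))
      ((List.range list.length).map (fun k : Nat => (k : Int)))
    rw [List.length_map, List.length_range] at h1
    omega
  have hs := rpGoA_isSome list (list.length + 1) (memo.getD []) index hbound
  obtain ⟨⟨b, memo'⟩, hg⟩ := Option.isSome_iff_exists.mp hs
  have hA : row_puzzle list memo index = b := by
    unfold row_puzzle; rw [hg]
  have hB : row_puzzle_alt list memo index = b := by
    unfold row_puzzle_alt
    rw [rpInit]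
    rw [rpBisim list _ _ _ _ _ hg []]
    cases b
    · simp [rpRunB]
    · simp
  rw [hA, hB]
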